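-- pv_equiv track=rewrite | github.com/kharedev/ds_interviews | custom_sort.py | get_bigger
-- ===== SOURCE A (Python) =====
-- def get_iterations(num):
--     seq=[]
--     first=0
--     last=num-1
--     i=0
--     while(first<=last):
--         if i%2==0:
--             seq.append(first)
--             first=first+1
--             i=i+1
--         else:
--             seq.append(last)
--             last=last-1
--             i=i+1
--     return seq
--
-- def get_bigger(st1, st2):
--     if (len(st1) != len(st2)):
--         if len(st1)>len(st2):
--             return st1
--         else:
--             return st2
--
--     l=len(st1)
--     sequence=get_iterations(l)
--     st1_="".join([st1[i].lower() for i in sequence])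
--     st2_="".join([st2[i].lower() for i in sequence])
--     if st1_<st2_:
--         return st1
--     else:
--         return st2
-- ===== SOURCE B (Python) =====
-- def get_bigger(st1, st2):
--     if len(st1) != len(st2):
--         return st1 if len(st1) > len(st2) else st2
--     first, last = 0, len(st1) - 1
--     take_first = True
--     while first <= last:
--         p = first if take_first else last
--         a = st1[p].lower()
--         b = st2[p].lower()
--         if a != b:
--             return st1 if a < b else st2
--         if take_first:
--             first += 1
--         else:
--             last -= 1
--         take_first = not take_first
--     return st2
-- ===== Notes on version B (the rewrite author's own statement) =====
-- stated objective: faster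
-- what changed: Instead of materializing both fully reordered-and-lowercased strings and comparing them, B walks the same alternating front/back positions with two toggling pointers and decides at the first position whose lowered characters differ (tie after a full scan still returns st2).
import Mathlib
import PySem

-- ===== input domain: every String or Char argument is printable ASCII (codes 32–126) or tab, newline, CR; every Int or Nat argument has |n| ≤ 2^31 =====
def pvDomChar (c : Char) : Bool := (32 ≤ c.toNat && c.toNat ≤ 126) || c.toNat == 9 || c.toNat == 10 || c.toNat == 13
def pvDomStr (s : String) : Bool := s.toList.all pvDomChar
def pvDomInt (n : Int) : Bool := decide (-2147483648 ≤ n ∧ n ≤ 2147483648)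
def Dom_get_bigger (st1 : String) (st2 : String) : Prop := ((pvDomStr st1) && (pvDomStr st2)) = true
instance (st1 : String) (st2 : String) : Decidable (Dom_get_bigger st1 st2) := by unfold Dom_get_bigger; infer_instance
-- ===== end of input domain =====

-- B replaces the materialize-both-reordered-strings-then-compare of A by an early-exit
-- two-pointer scan over the same alternating front/back positions (simpler / constant-factor faster).

-- ===== PORT A =====
-- the while-loop of get_iterations, state (seq, first, last, i)
def get_iterations_loop (seq : List Int) (first last i : Int) : List Int :=
  if _h : first ≤ last then
    if PySem.Int.mod i 2 = 0 then
      get_iterations_loop (seq ++ [first]) (first + 1) last (i + 1)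
    else
      get_iterations_loop (seq ++ [last]) first (last - 1) (i + 1)
  else seq
termination_by (last - first + 1).toNat
decreasing_by all_goals omega

def get_iterations (num : Int) : List Int :=
  get_iterations_loop [] 0 (num - 1) 0

def get_bigger (st1 : String) (st2 : String) : String :=
  if PySem.Str.len st1 ≠ PySem.Str.len st2 then
    if PySem.Str.len st1 > PySem.Str.len st2 then st1 else st2
  else
    let l := PySem.Str.len st1
    let sequence := get_iterations l
    let st1_ := PySem.Chars.join []
      (sequence.map (fun i => PySem.Chars.lower [PySem.List.pyGetD st1.toList i ' ']))
    let st2_ := PySem.Chars.join []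
      (sequence.map (fun i => PySem.Chars.lower [PySem.List.pyGetD st2.toList i ' ']))
    if st1_ < st2_ then st1 else st2

-- ===== PORT B =====
-- the while-loop of B: two pointers toggling front/back, early exit at the first
-- position whose lowered characters differ
def alt_scan (st1 st2 : String) (s1 s2 : List Char) (first last : Int) (takeFirst : Bool) : String :=
  if _h : first ≤ last then
    let p := if takeFirst then first else last
    let a := PySem.Chars.lower [PySem.List.pyGetD s1 p ' ']
    let b := PySem.Chars.lower [PySem.List.pyGetD s2 p ' ']
    if a ≠ b then
      if a < b then st1 else st2
    else
      if takeFirst then alt_scan st1 st2 s1 s2 (first + 1) last false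
      else alt_scan st1 st2 s1 s2 first (last - 1) true
  else st2
termination_by (last - first + 1).toNat
decreasing_by all_goals omega

def get_bigger_alt (st1 : String) (st2 : String) : String :=
  if PySem.Str.len st1 ≠ PySem.Str.len st2 then
    if PySem.Str.len st1 > PySem.Str.len st2 then st1 else st2
  else
    alt_scan st1 st2 st1.toList st2.toList 0 (PySem.Str.len st1 - 1) true

-- ===== PRECONDITION & SPEC =====
def Spec_get_bigger (st1 : String) (st2 : String) (out : String) : Prop := out = get_bigger_alt st1 st2
instance (st1 : String) (st2 : String) (out : String) : Decidable (Spec_get_bigger st1 st2 out) := by unfold Spec_get_bigger; infer_instance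

-- ===== CLAIM (what is proved, stated in full; the proofs are below) =====
def Claim_equal_get_bigger : Prop := ∀ (st1 : String) (st2 : String), Dom_get_bigger st1 st2 → Spec_get_bigger st1 st2 (get_bigger st1 st2)

-- ===== LEMMAS AND PROOFS =====

-- the alternating front/back index sequence, parametrised by whose turn it is
def iterSeq (first last : Int) (tf : Bool) : List Int :=
  if _h : first ≤ last then
    if tf then first :: iterSeq (first + 1) last false
    else last :: iterSeq first (last - 1) true
  else []
termination_by (last - first + 1).toNat
decreasing_by all_goals omega

theorem iterSeq_nil (first last : Int) (tf : Bool) (h : ¬ first ≤ last) :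
    iterSeq first last tf = [] := by rw [iterSeq]; simp [h]

theorem iterSeq_true (first last : Int) (h : first ≤ last) :
    iterSeq first last true = first :: iterSeq (first + 1) last false := by rw [iterSeq]; simp [h]

theorem iterSeq_false (first last : Int) (h : first ≤ last) :
    iterSeq first last false = last :: iterSeq first (last - 1) true := by rw [iterSeq]; simp [h]

theorem get_iterations_loop_eq (seq : List Int) (first last i : Int) (tf : Bool)
    (hi : (PySem.Int.mod i 2 = 0) = tf) :
    get_iterations_loop seq first last i = seq ++ iterSeq first last tf := by
  rw [get_iterations_loop]
  by_cases h : first ≤ last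
  · have hflip : (PySem.Int.mod (i + 1) 2 = 0) = (!tf : Bool) := by
      rw [PySem.Int.mod_eq_emod_of_pos (by norm_num)] at hi ⊢
      cases tf <;> simp_all <;> omega
    cases tf with
    | true =>
      rw [dif_pos h, if_pos (by simpa using hi), iterSeq_true first last h,
        get_iterations_loop_eq (seq ++ [first]) (first + 1) last (i + 1) false
          (by simpa using hflip)]
      simp
    | false =>
      rw [dif_pos h, if_neg (by simpa using hi), iterSeq_false first last h,
        get_iterations_loop_eq (seq ++ [last]) first (last - 1) (i + 1) true
          (by simpa using hflip)]
      simp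
  · rw [dif_neg h, iterSeq_nil first last tf h, List.append_nil]
termination_by (last - first + 1).toNat
decreasing_by all_goals omega

-- one step of B's loop, with the let-bindings evaluated
theorem alt_scan_step_true (st1 st2 : String) (s1 s2 : List Char) (first last : Int) (h : first ≤ last) :
    alt_scan st1 st2 s1 s2 first last true =
      if PySem.Chars.lower [PySem.List.pyGetD s1 first ' '] ≠ PySem.Chars.lower [PySem.List.pyGetD s2 first ' '] then
        (if PySem.Chars.lower [PySem.List.pyGetD s1 first ' '] < PySem.Chars.lower [PySem.List.pyGetD s2 first ' '] then st1 else st2)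
      else alt_scan st1 st2 s1 s2 (first + 1) last false := by
  rw [alt_scan]; simp [h]

theorem alt_scan_step_false (st1 st2 : String) (s1 s2 : List Char) (first last : Int) (h : first ≤ last) :
    alt_scan st1 st2 s1 s2 first last false =
      if PySem.Chars.lower [PySem.List.pyGetD s1 last ' '] ≠ PySem.Chars.lower [PySem.List.pyGetD s2 last ' '] then
        (if PySem.Chars.lower [PySem.List.pyGetD s1 last ' '] < PySem.Chars.lower [PySem.List.pyGetD s2 last ' '] then st1 else st2)
      else alt_scan st1 st2 s1 s2 first (last - 1) true := by
  rw [alt_scan]; simp [h]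

-- [x] vs [y] as 1-char strings compare as the characters do
theorem singleton_lt_iff (x y : Char) : (([x] : List Char) < [y]) ↔ x < y := by
  rw [List.cons_lt_cons_iff]; simp

-- comparing first the lowered characters at position p, then the rest, is the
-- lexicographic comparison of the whole lowered sequences
theorem step_vs_lex (st1 st2 : String) (s1 s2 : List Char) (p : Int) (rest : List Int) :
    (if PySem.Chars.lower [PySem.List.pyGetD s1 p ' '] ≠ PySem.Chars.lower [PySem.List.pyGetD s2 p ' '] then
      (if PySem.Chars.lower [PySem.List.pyGetD s1 p ' '] < PySem.Chars.lower [PySem.List.pyGetD s2 p ' '] then st1 else st2)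
    else
      if rest.map (fun i => PySem.Chars.lowerChar (PySem.List.pyGetD s1 i ' '))
          < rest.map (fun i => PySem.Chars.lowerChar (PySem.List.pyGetD s2 i ' '))
      then st1 else st2) =
    if (p :: rest).map (fun i => PySem.Chars.lowerChar (PySem.List.pyGetD s1 i ' '))
        < (p :: rest).map (fun i => PySem.Chars.lowerChar (PySem.List.pyGetD s2 i ' '))
    then st1 else st2 := by
  set a := PySem.Chars.lowerChar (PySem.List.pyGetD s1 p ' ') with ha
  set b := PySem.Chars.lowerChar (PySem.List.pyGetD s2 p ' ') with hb
  have hla : PySem.Chars.lower [PySem.List.pyGetD s1 p ' '] = [a] := by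
    simp [PySem.Chars.lower, ha]
  have hlb : PySem.Chars.lower [PySem.List.pyGetD s2 p ' '] = [b] := by
    simp [PySem.Chars.lower, hb]
  rw [hla, hlb, List.map_cons, List.map_cons, ← ha, ← hb]
  by_cases hab : a = b
  · simp [hab]
  · have hcons : (a :: rest.map (fun i => PySem.Chars.lowerChar (PySem.List.pyGetD s1 i ' '))
        < b :: rest.map (fun i => PySem.Chars.lowerChar (PySem.List.pyGetD s2 i ' '))) ↔ a < b := by
      rw [List.cons_lt_cons_iff]; simp [hab]
    rw [if_pos (by simp [hab] : ¬([a] : List Char) = [b]),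
      if_congr (singleton_lt_iff a b) rfl rfl, if_congr hcons rfl rfl]

theorem alt_scan_eq (st1 st2 : String) (s1 s2 : List Char) (first last : Int) (tf : Bool) :
    alt_scan st1 st2 s1 s2 first last tf =
      if (iterSeq first last tf).map (fun i => PySem.Chars.lowerChar (PySem.List.pyGetD s1 i ' '))
          < (iterSeq first last tf).map (fun i => PySem.Chars.lowerChar (PySem.List.pyGetD s2 i ' '))
      then st1 else st2 := by
  by_cases h : first ≤ last
  · cases tf with
    | true =>
      rw [alt_scan_step_true st1 st2 s1 s2 first last h, iterSeq_true first last h,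
        alt_scan_eq st1 st2 s1 s2 (first + 1) last false]
      exact step_vs_lex st1 st2 s1 s2 first (iterSeq (first + 1) last false)
    | false =>
      rw [alt_scan_step_false st1 st2 s1 s2 first last h, iterSeq_false first last h,
        alt_scan_eq st1 st2 s1 s2 first (last - 1) true]
      exact step_vs_lex st1 st2 s1 s2 last (iterSeq first (last - 1) true)
  · rw [alt_scan, iterSeq_nil first last tf h]
    simp [h]
termination_by (last - first + 1).toNat
decreasing_by all_goals omega

-- A's joined reordered lowered string is the map of lowered chars over the index sequence
theorem join_lower_eq_map (s : List Char) (seq : List Int) :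
    PySem.Chars.join [] (seq.map (fun i => PySem.Chars.lower [PySem.List.pyGetD s i ' ']))
      = seq.map (fun i => PySem.Chars.lowerChar (PySem.List.pyGetD s i ' ')) := by
  have h : seq.map (fun i => PySem.Chars.lower [PySem.List.pyGetD s i ' '])
      = (seq.map (fun i => PySem.Chars.lowerChar (PySem.List.pyGetD s i ' '))).map (fun c => [c]) := by
    simp [PySem.Chars.lower, List.map_map, Function.comp]
  rw [h, PySem.Chars.join_nil_singletons]

-- ===== VERDICT (by name: the statement is the Claim_ definition above) =====
theorem get_bigger_spec : Claim_equal_get_bigger := by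
  intro st1 st2 _
  unfold Spec_get_bigger get_bigger get_bigger_alt get_iterations
  by_cases hlen : PySem.Str.len st1 ≠ PySem.Str.len st2
  · rw [if_pos hlen, if_pos hlen]
  · rw [if_neg hlen, if_neg hlen]
    dsimp only
    rw [alt_scan_eq,
      get_iterations_loop_eq [] 0 (PySem.Str.len st1 - 1) 0 true (by decide),
      List.nil_append, join_lower_eq_map, join_lower_eq_map]
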